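-- pv_equiv track=rewrite | github.com/ConanMp/Metabolism_map_prediction_pipeline | calculate_probability_parallel_heterogenous_final2020.py | get_present_parent_and_enzyme
-- ===== SOURCE A (Python) =====
-- def get_present_parent_and_enzyme(enzyme_case, node_case, letter_dependencie_dic):
--     parent_enzymes=[]
--     parent_nodes=[]
--     for key in letter_dependencie_dic.keys():
--         parent=key[0]
--         enzyme=key[1]
--         parent_enzymes.append(enzyme)
--         parent_nodes.append(parent)
--     present_parent=[]
--     prensent_enzyme=[]
--     enzyme_case=enzyme_case.split("\t")
--     node_case=node_case.split("\t")
--     for an_enz in enzyme_case: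
--         if "~" in an_enz:
--             continue
--         else:
--             if an_enz in parent_enzymes:
--                 prensent_enzyme.append(an_enz)
--     for a_parent in node_case:
--         if "~" in a_parent:
--             continue
--         else:
--             if a_parent in parent_nodes:
--                 present_parent.append(a_parent)
--     to_delete_parent=[]
--     for parent in present_parent:
--         del_parent=True
--         for key in letter_dependencie_dic.keys():
--             if key[0]==parent:
--                 enz=key[1]
--                 if enz in prensent_enzyme:
--                     del_parent=False
--         if del_parent:
--             to_delete_parent.append(parent)
--     for parent in to_delete_parent:
--         while parent in present_parent:
--             present_parent.remove(parent)
--     return (present_parent, prensent_enzyme)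
-- ===== SOURCE B (Python) =====
-- def get_present_parent_and_enzyme(enzyme_case, node_case, letter_dependencie_dic):
--     enzyme_set = {key[1] for key in letter_dependencie_dic}
--     present_enzyme = [e for e in enzyme_case.split("\t")
--                       if "~" not in e and e in enzyme_set]
--     present_enzyme_set = set(present_enzyme)
--     valid_parents = {key[0] for key in letter_dependencie_dic
--                      if key[1] in present_enzyme_set}
--     present_parent = [p for p in node_case.split("\t")
--                       if "~" not in p and p in valid_parents]
--     return (present_parent, present_enzyme)
-- ===== Notes on version B (the rewrite author's own statement) =====
-- stated objective: simpler
-- what changed: Replaces A's build-candidate-list-then-nested-scan-then-delete machinery (four loops plus a quadratic delete pass) with a single index-first pipeline: a set of enzymes, one filtered pass for present enzymes, a set of valid parents keyed by present enzymes, and one filtered pass over node_case.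
import Mathlib
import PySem

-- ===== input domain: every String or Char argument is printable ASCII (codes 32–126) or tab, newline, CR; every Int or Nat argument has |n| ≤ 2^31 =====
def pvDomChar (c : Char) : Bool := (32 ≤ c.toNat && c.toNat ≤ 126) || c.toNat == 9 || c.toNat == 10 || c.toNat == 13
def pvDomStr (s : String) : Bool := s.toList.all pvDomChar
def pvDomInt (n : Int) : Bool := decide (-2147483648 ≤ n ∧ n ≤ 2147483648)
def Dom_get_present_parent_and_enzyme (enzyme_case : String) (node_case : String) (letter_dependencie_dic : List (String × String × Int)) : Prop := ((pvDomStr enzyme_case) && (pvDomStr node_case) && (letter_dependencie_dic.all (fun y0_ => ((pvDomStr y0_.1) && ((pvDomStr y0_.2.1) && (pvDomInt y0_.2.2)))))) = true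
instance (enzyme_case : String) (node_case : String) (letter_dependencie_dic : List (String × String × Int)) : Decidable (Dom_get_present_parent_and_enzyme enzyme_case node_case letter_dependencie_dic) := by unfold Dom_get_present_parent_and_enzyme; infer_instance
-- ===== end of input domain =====

-- B replaces A's candidate-list + nested-scan + delete machinery by one index-first
-- filtered pipeline (simpler); both programs are total, return value only.

-- ===== PORT A =====

-- `while parent in present_parent: present_parent.remove(parent)` (remove = erase of the first occurrence; erasing shortens the list)
def pyRemoveAll (l : List String) (v : String) : List String :=
  if hv : v ∈ l then pyRemoveAll (l.erase v) v else l
termination_by l.length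
decreasing_by
  have h1 := List.length_erase_of_mem hv
  have h2 : 0 < l.length := List.length_pos_of_mem hv
  omega

def get_present_parent_and_enzyme (enzyme_case : String) (node_case : String) (letter_dependencie_dic : List (String × String × Int)) : List String × List String :=
  let pe_pn := letter_dependencie_dic.foldl
      (fun (acc : List String × List String) key =>
        (acc.1 ++ [key.2.1], acc.2 ++ [key.1])) ([], [])
  let parent_enzymes := pe_pn.1
  let parent_nodes := pe_pn.2
  let ec := (PySem.Str.split? enzyme_case "\t").getD []
  let nc := (PySem.Str.split? node_case "\t").getD []
  let prensent_enzyme := ec.foldl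
      (fun acc an_enz =>
        if PySem.Str.isIn "~" an_enz then acc
        else if parent_enzymes.contains an_enz then acc ++ [an_enz] else acc) []
  let present_parent := nc.foldl
      (fun acc a_parent =>
        if PySem.Str.isIn "~" a_parent then acc
        else if parent_nodes.contains a_parent then acc ++ [a_parent] else acc) []
  let to_delete_parent := present_parent.foldl
      (fun acc parent =>
        let del_parent := letter_dependencie_dic.foldl
            (fun del key =>
              if key.1 == parent then
                (if prensent_enzyme.contains key.2.1 then false else del)
              else del) true
        if del_parent then acc ++ [parent] else acc) []
  let present_parent := to_delete_parent.foldl (fun cur parent => pyRemoveAll cur parent) present_parent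
  (present_parent, prensent_enzyme)

-- ===== PORT B =====
def get_present_parent_and_enzyme_alt (enzyme_case : String) (node_case : String) (letter_dependencie_dic : List (String × String × Int)) : List String × List String :=
  let enzyme_set : PySem.Set String := PySem.Set.ofList (letter_dependencie_dic.map (fun key => key.2.1))
  let present_enzyme := ((PySem.Str.split? enzyme_case "\t").getD []).filter
      (fun e => !PySem.Str.isIn "~" e && PySem.Set.contains enzyme_set e)
  let present_enzyme_set : PySem.Set String := PySem.Set.ofList present_enzyme
  let valid_parents : PySem.Set String := PySem.Set.ofList
      ((letter_dependencie_dic.filter (fun key => PySem.Set.contains present_enzyme_set key.2.1)).map (fun key => key.1))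
  let present_parent := ((PySem.Str.split? node_case "\t").getD []).filter
      (fun p => !PySem.Str.isIn "~" p && PySem.Set.contains valid_parents p)
  (present_parent, present_enzyme)

-- ===== PRECONDITION & SPEC =====
def Spec_get_present_parent_and_enzyme (enzyme_case : String) (node_case : String) (letter_dependencie_dic : List (String × String × Int)) (out : List String × List String) : Prop := out = get_present_parent_and_enzyme_alt enzyme_case node_case letter_dependencie_dic
instance (enzyme_case : String) (node_case : String) (letter_dependencie_dic : List (String × String × Int)) (out : List String × List String) : Decidable (Spec_get_present_parent_and_enzyme enzyme_case node_case letter_dependencie_dic out) := by unfold Spec_get_present_parent_and_enzyme; infer_instance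

-- ===== CLAIM (what is proved, stated in full; the proofs are below) =====
def Claim_equal_get_present_parent_and_enzyme : Prop := ∀ (enzyme_case : String) (node_case : String) (letter_dependencie_dic : List (String × String × Int)), Dom_get_present_parent_and_enzyme enzyme_case node_case letter_dependencie_dic → Spec_get_present_parent_and_enzyme enzyme_case node_case letter_dependencie_dic (get_present_parent_and_enzyme enzyme_case node_case letter_dependencie_dic)

-- ===== LEMMAS AND PROOFS =====

-- A's first loop collects the two projections of the keys
lemma pair_loop_eq (dic : List (String × String × Int)) (a b : List String) :
    dic.foldl (fun (acc : List String × List String) key =>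
        (acc.1 ++ [key.2.1], acc.2 ++ [key.1])) (a, b)
      = (a ++ dic.map (fun k => k.2.1), b ++ dic.map (fun k => k.1)) := by
  induction dic generalizing a b with
  | nil => simp
  | cons x xs ih => simp [List.foldl, ih]

-- A's append-if loops with a two-test body are filters
lemma collect_loop_eq (c1 c2 : String → Bool) (l acc : List String) :
    l.foldl (fun acc x => if c1 x then acc else if c2 x then acc ++ [x] else acc) acc
      = acc ++ l.filter (fun x => !c1 x && c2 x) := by
  induction l generalizing acc with
  | nil => simp
  | cons x xs ih =>
      by_cases h1 : c1 x <;> by_cases h2 : c2 x <;>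
        simp [List.foldl, ih, h1, h2, List.filter]

-- A's inner del_parent loop
lemma del_loop_eq (dic : List (String × String × Int)) (E : List String) (p : String) (b : Bool) :
    dic.foldl (fun del key =>
        if key.1 == p then (if E.contains key.2.1 then false else del) else del) b
      = (b && !(dic.any (fun k => k.1 == p && E.contains k.2.1))) := by
  induction dic generalizing b with
  | nil => simp
  | cons x xs ih =>
      rw [List.foldl_cons, ih]
      by_cases h1 : x.1 == p <;> by_cases h2 : E.contains x.2.1 <;>
        simp [h1, h2, Bool.and_comm, Bool.and_assoc]

-- erasing one occurrence of v does not change the v-free filter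
lemma erase_filter_ne (v : String) (l : List String) :
    (l.erase v).filter (fun x => !(x == v)) = l.filter (fun x => !(x == v)) := by
  induction l with
  | nil => simp
  | cons x xs ih =>
      by_cases h : x = v
      · simp [h]
      · simp [beq_iff_eq, h, ih]

-- repeated .remove of one value empties all its occurrences
lemma pyRemoveAll_eq_filter (l : List String) (v : String) :
    pyRemoveAll l v = l.filter (fun x => !(x == v)) := by
  rw [pyRemoveAll]
  split_ifs with hv
  · rw [pyRemoveAll_eq_filter (l.erase v) v]
    exact erase_filter_ne v l
  · have : ∀ x ∈ l, (!(x == v)) = true := by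
      intro x hx; simpa using fun (he : x = v) => hv (he ▸ hx)
    simp [List.filter_eq_self.mpr this]
termination_by l.length
decreasing_by
  have h1 := List.length_erase_of_mem hv
  have h2 : 0 < l.length := List.length_pos_of_mem hv
  omega

-- the delete pass over to_delete
lemma delete_pass_eq (td cur : List String) :
    td.foldl (fun cur parent => pyRemoveAll cur parent) cur
      = cur.filter (fun x => !td.contains x) := by
  induction td generalizing cur with
  | nil => simp
  | cons t ts ih =>
      rw [List.foldl_cons, pyRemoveAll_eq_filter, ih, List.filter_filter]
      apply List.filter_congr
      intro x _
      by_cases h1 : x == t <;> by_cases h2 : ts.contains x <;> simp_all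


-- set(xs) membership test is plain list membership
lemma set_ofList_contains (l : List String) (x : String) :
    PySem.Set.contains (PySem.Set.ofList l) x = l.contains x := by
  by_cases h : x ∈ l <;> simp [PySem.Set.mem_ofList, h]

-- B's valid_parents membership equals A's inner any-scan over the keys
lemma valid_eq (dic : List (String × String × Int)) (E : List String) (p : String) :
    ((dic.filter (fun k => E.contains k.2.1)).map (fun k => k.1)).contains p
      = dic.any (fun k => k.1 == p && E.contains k.2.1) := by
  rw [Bool.eq_iff_iff]
  simp only [List.contains_iff_mem, List.mem_map, List.mem_filter, List.any_eq_true,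
    Bool.and_eq_true, beq_iff_eq, List.contains_iff_mem]
  constructor
  · rintro ⟨k, ⟨hk, he⟩, rfl⟩; exact ⟨k, hk, rfl, he⟩
  · rintro ⟨k, hk, rfl, he⟩; exact ⟨k, ⟨hk, he⟩, rfl⟩

-- A's filter-scan-delete pipeline on the parents equals B's single index-first filter
lemma main_first (c : String → Bool) (nc : List String) (dic : List (String × String × Int)) (E : List String) :
    ((nc.filter (fun p => !c p && (dic.map (fun k => k.1)).contains p)).filter
      (fun x => !((nc.filter (fun p => !c p && (dic.map (fun k => k.1)).contains p)).filter
          (fun p => !(dic.any (fun k => k.1 == p && E.contains k.2.1)))).contains x))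
    = nc.filter (fun p => !c p &&
        ((dic.filter (fun k => E.contains k.2.1)).map (fun k => k.1)).contains p) := by
  simp only [valid_eq]
  set good : String → Bool := fun p => dic.any (fun k => k.1 == p && E.contains k.2.1) with hgood
  set pp := nc.filter (fun p => !c p && (dic.map (fun k => k.1)).contains p) with hpp
  have step1 : pp.filter (fun x => !(pp.filter (fun p => !good p)).contains x) = pp.filter good := by
    apply List.filter_congr
    intro x hx
    by_cases hg : good x
    · simp [List.mem_filter, hg, hx]
    · simp [List.mem_filter, hg, hx]
  rw [step1, hpp, List.filter_filter]
  apply List.filter_congr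
  intro p _
  rw [Bool.eq_iff_iff]
  simp only [hgood, Bool.and_eq_true, List.contains_iff_mem, List.any_eq_true, beq_iff_eq,
    List.mem_map]
  tauto

-- ===== VERDICT (by name: the statement is the Claim_ definition above) =====
theorem get_present_parent_and_enzyme_spec : Claim_equal_get_present_parent_and_enzyme := by
  intro ec nc dic _
  unfold Spec_get_present_parent_and_enzyme
  simp only [get_present_parent_and_enzyme, get_present_parent_and_enzyme_alt,
    pair_loop_eq, List.nil_append, collect_loop_eq, del_loop_eq, Bool.true_and,
    PySem.List.foldl_append_if (fun p => _) (fun p => p), delete_pass_eq,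
    set_ofList_contains, List.map_id']
  exact Prod.ext (main_first (fun x => PySem.Str.isIn "~" x) _ dic _) rfl
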